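-- pv_equiv track=rewrite | github.com/explodeo/computer-science-cs-coterm-archive-IIT | CS331/lab1 backups.py | gen_pattern
-- ===== SOURCE A (Python) =====
-- def gen_pattern(chars):
--     length = len(chars)
--     string = ''
--     dots = (length*2 - 1)*2 - 1
--     if length == 1:
--         return chars
--     else:
--         string = ('.'.join(chars[length-1:0:-1]+chars)).center(dots,'.')
--         for index in range(1, length):
--             line = ('.'.join(chars[length-1:index-1:-1]+chars[index+1:length])).center(dots,'.')
--             string += '\n'+ line
--         return string[len(string)-1:dots:-1]+'\n'+string
-- ===== SOURCE B (Python) =====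
-- def gen_pattern(chars):
--     length = len(chars)
--     dots = (length*2 - 1)*2 - 1
--     rows = []
--     for r in range(2*length - 1):
--         i = abs(r - (length - 1))
--         rows.append('.'.join(chars[i:][::-1] + chars[i+1:]).center(dots, '.'))
--     return '\n'.join(rows)
-- ===== Notes on version B (the rewrite author's own statement) =====
-- stated objective: simpler
-- what changed: B builds every output row directly in one loop over all 2*len-1 rows via the half-index i=abs(r-(len-1)) and joins them, instead of A's scheme of building the lower half by string accumulation and mirroring it with a character-reversal slice; the length==1 special case disappears.
-- intended difference: On the empty string A returns a one-character string holding just a newline (an artefact of its slice arithmetic: both halves are empty but the joining newline survives), while B returns the empty string, the natural zero-row pattern. — e.g. on gen_pattern(""): A returns "\n", B returns ""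
import Mathlib
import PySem

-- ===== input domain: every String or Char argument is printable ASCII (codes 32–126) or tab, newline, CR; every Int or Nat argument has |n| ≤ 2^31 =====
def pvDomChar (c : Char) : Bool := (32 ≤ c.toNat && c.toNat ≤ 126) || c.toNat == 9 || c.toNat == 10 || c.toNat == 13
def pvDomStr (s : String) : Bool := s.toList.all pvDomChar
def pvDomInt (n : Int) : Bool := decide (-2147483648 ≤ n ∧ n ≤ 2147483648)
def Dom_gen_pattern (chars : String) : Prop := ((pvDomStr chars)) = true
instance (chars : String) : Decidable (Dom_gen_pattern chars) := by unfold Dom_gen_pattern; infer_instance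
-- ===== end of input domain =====

-- B builds each output row directly (half-index i = |r-(len-1)|) in one loop instead of A's
-- build-lower-half-then-mirror-by-character-reversal scheme; objective: simpler.

-- shared builtin helper: exact port of CPython str.center(width, fill):
-- marg = width - len(s); left = marg//2 + (marg & width & 1); the bit test equals
-- "marg odd and width odd", written as such (both operands are taken at bit 0).
def pyCenter (s : List Char) (width : Int) (fill : Char) : List Char :=
  let len : Int := PySem.Chars.len s
  if width ≤ len then s
  else
    let marg := width - len
    let left := PySem.Int.floordiv marg 2 +
      (if PySem.Int.mod marg 2 = 1 ∧ PySem.Int.mod width 2 = 1 then 1 else 0)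
    List.replicate left.toNat fill ++ s ++ List.replicate (marg - left).toNat fill

-- ===== PORT A =====
-- '.'.join(chars[length-1:index-1:-1]+chars[index+1:length]).center(dots,'.')   (loop body line)
def lineA (cs : List Char) (length dots index : Int) : List Char :=
  let l1 := (PySem.List.slice? cs (some (length - 1)) (some (index - 1)) (-1)).getD []
  let l2 := PySem.List.slice cs (some (index + 1)) (some length)
  pyCenter (PySem.Chars.join ['.'] ((l1 ++ l2).map (fun c => [c]))) dots '.'

def gen_pattern (chars : String) : String :=
  let cs := chars.toList
  let length : Int := PySem.Chars.len cs
  let dots := (length * 2 - 1) * 2 - 1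
  if length = 1 then chars
  else
    -- '.'.join(chars[length-1:0:-1]+chars).center(dots,'.') ; step -1 ≠ 0, slice? is never none
    let lower := (PySem.List.slice? cs (some (length - 1)) (some 0) (-1)).getD []
    let string0 := pyCenter (PySem.Chars.join ['.'] ((lower ++ cs).map (fun c => [c]))) dots '.'
    let string := (PySem.List.pyRange 1 length 1).foldl
      (fun string index => string ++ '\n' :: lineA cs length dots index) string0
    -- string[len(string)-1:dots:-1] + '\n' + string
    let mirror := (PySem.List.slice? string (some (PySem.Chars.len string - 1)) (some dots) (-1)).getD []
    String.ofList (mirror ++ '\n' :: string)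

-- ===== PORT B =====
-- '.'.join(chars[i:][::-1] + chars[i+1:]).center(dots, '.')   with i = abs(r - (length-1))
def rowB (cs : List Char) (length dots r : Int) : List Char :=
  let i := |r - (length - 1)|
  let left := (PySem.List.slice? (PySem.List.slice cs (some i) none) none none (-1)).getD []
  let right := PySem.List.slice cs (some (i + 1)) none
  pyCenter (PySem.Chars.join ['.'] ((left ++ right).map (fun c => [c]))) dots '.'

def gen_pattern_alt (chars : String) : String :=
  let cs := chars.toList
  let length : Int := PySem.Chars.len cs
  let dots := (length * 2 - 1) * 2 - 1
  let rows := (PySem.List.pyRange 0 (2 * length - 1) 1).foldl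
    (fun rows r => rows ++ [rowB cs length dots r]) []
  String.ofList (PySem.Chars.join ['\n'] rows)

-- ===== PRECONDITION & SPEC =====
-- On the empty string A returns a one-character string holding just a newline (an artefact of
-- its slice arithmetic: both halves are empty but the joining newline survives), while B
-- returns the empty string, the natural zero-row pattern.
def D_gen_pattern (chars : String) : Prop := chars = ""
instance (chars : String) : Decidable (D_gen_pattern chars) := by unfold D_gen_pattern; infer_instance
def Spec_gen_pattern (chars : String) (out : String) : Prop := ¬ D_gen_pattern chars → out = gen_pattern_alt chars
instance (chars : String) (out : String) : Decidable (Spec_gen_pattern chars out) := by unfold Spec_gen_pattern; infer_instance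
def pvDiffWitness_gen_pattern : String := ""
def pvDiffWitnessOut_gen_pattern : String × String := ("\n", "")

-- ===== CLAIM (what is proved, stated in full; the proofs are below) =====
def Claim_unchanged_gen_pattern : Prop := ∀ (chars : String), Dom_gen_pattern chars → Spec_gen_pattern chars (gen_pattern chars)
def Claim_changed_gen_pattern : Prop := Dom_gen_pattern (pvDiffWitness_gen_pattern) ∧ D_gen_pattern (pvDiffWitness_gen_pattern) ∧ gen_pattern (pvDiffWitness_gen_pattern) = pvDiffWitnessOut_gen_pattern.1 ∧ gen_pattern_alt (pvDiffWitness_gen_pattern) = pvDiffWitnessOut_gen_pattern.2 ∧ pvDiffWitnessOut_gen_pattern.1 ≠ pvDiffWitnessOut_gen_pattern.2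
def Claim_exact_gen_pattern : Prop := ∀ (chars : String), Dom_gen_pattern chars → D_gen_pattern chars → gen_pattern chars ≠ gen_pattern_alt chars

-- ===== LEMMAS AND PROOFS =====

-- '.'-interspersion of a character list ('.'.join of a string), recursively
def ispD : List Char → List Char
  | [] => []
  | [c] => [c]
  | c :: c' :: rest => c :: '.' :: ispD (c' :: rest)

-- the i-th half-row content and the padded row; rowW = dots = 4*len-3
def rowC (cs : List Char) (i : ℕ) : List Char := ispD ((cs.drop i).reverse ++ cs.drop (i+1))
def rowW (cs : List Char) : Int := ((cs.length : Int) * 2 - 1) * 2 - 1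
def rowP (cs : List Char) (i : ℕ) : List Char := pyCenter (rowC cs i) (rowW cs) '.'
def joinNL (rs : List (List Char)) : List Char := PySem.Chars.join ['\n'] rs
def restRows (cs : List Char) : List (List Char) :=
  (List.range (cs.length - 1)).map (fun k => rowP cs (k + 1))

theorem joinSing : ∀ l : List Char, PySem.Chars.join ['.'] (l.map (fun c => [c])) = ispD l
  | [] => by simp [PySem.Chars.join, List.intercalate, ispD]
  | [c] => by simp [PySem.Chars.join, List.intercalate, ispD]
  | c :: c' :: t => by
    have ih := joinSing (c' :: t)
    simp only [PySem.Chars.join, List.intercalate, List.map_cons, List.intersperse] at ih ⊢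
    simp_all [ispD]

theorem ispD_length : ∀ l : List Char, l ≠ [] → (ispD l).length = 2 * l.length - 1
  | [c], _ => by simp [ispD]
  | c :: c' :: t, _ => by
    have ih := ispD_length (c' :: t) (by simp)
    simp [ispD] at ih ⊢
    omega

theorem ispD_append_singleton : ∀ (l : List Char) (c : Char), l ≠ [] →
    ispD (l ++ [c]) = ispD l ++ '.' :: [c]
  | [x], c, _ => by simp [ispD]
  | x :: y :: t, c, _ => by
    have ih := ispD_append_singleton (y :: t) c (by simp)
    simp [ispD] at ih ⊢
    exact ih

theorem ispD_reverse : ∀ l : List Char, (ispD l).reverse = ispD l.reverse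
  | [] => by simp [ispD]
  | [c] => by simp [ispD]
  | c :: c' :: t => by
    have ih := ispD_reverse (c' :: t)
    simp only [ispD, List.reverse_cons, ih]
    rw [ispD_append_singleton (t.reverse ++ [c']) c (by simp)]
    simp

theorem pyCenter_of_le (s : List Char) (width : Int) (f : Char) (h : width ≤ (s.length : Int)) :
    pyCenter s width f = s := by
  simp [pyCenter, PySem.Chars.len, h]

theorem pyCenter_pad (s : List Char) (w : ℕ) (f : Char) (k : ℕ)
    (h : s.length + 2 * k = w) :
    pyCenter s (w : Int) f = List.replicate k f ++ s ++ List.replicate k f := by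
  by_cases hle : (w : Int) ≤ (s.length : Int)
  · have hk : k = 0 := by omega
    subst hk
    simp only [List.replicate_zero, List.nil_append, List.append_nil]
    exact pyCenter_of_le s _ f hle
  · have h2k : ((2 : Int) * (k : Int)).fdiv 2 = (k : Int) := by
      rw [Int.fdiv_eq_ediv_of_nonneg _ (by norm_num : (0 : Int) ≤ 2)]
      omega
    have hfd : PySem.Int.floordiv ((w : Int) - (s.length : Int)) 2 = (k : Int) := by
      unfold PySem.Int.floordiv
      rw [show (w : Int) - (s.length : Int) = (2 : Int) * (k : Int) by omega]
      exact h2k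
    have hmod : PySem.Int.mod ((w : Int) - (s.length : Int)) 2 = 0 := by
      unfold PySem.Int.mod
      rw [show (w : Int) - (s.length : Int) = (2 : Int) * (k : Int) by omega]
      have hh := Int.fmod_add_mul_fdiv ((2 : Int) * (k : Int)) 2
      rw [h2k] at hh
      linarith
    simp only [pyCenter, PySem.Chars.len_eq]
    rw [if_neg hle]
    simp only [hfd, hmod]
    rw [if_neg (by simp)]
    have e1 : ((k : Int) + 0).toNat = k := by omega
    have e2 : ((w : Int) - (s.length : Int) - ((k : Int) + 0)).toNat = k := by omega
    rw [e1, e2]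

-- step -1 slices: xs[a:b:-1] = reverse of xs[b+1:a+1]   (0 ≤ b < a < len xs)
theorem filterMap_range_rev {α : Type} (xs : List α) (a : ℕ) (ha : a < xs.length) :
    ∀ c : ℕ, c ≤ a + 1 →
      List.filterMap (fun k : ℕ => xs[((a : Int) + -1 * (k : Int)).toNat]?) (List.range c)
        = ((xs.drop (a + 1 - c)).take c).reverse := by
  intro c
  induction c with
  | zero => intro _; simp
  | succ c ih =>
    intro hc
    rw [List.range_succ, List.filterMap_append, ih (by omega)]
    have hidx : ((a : Int) + -1 * (c : Int)).toNat = a - c := by omega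
    have hac : a - c < xs.length := by omega
    have hsome : xs[((a : Int) + -1 * (c : Int)).toNat]? = some xs[a - c] := by
      rw [hidx]; exact List.getElem?_eq_getElem hac
    simp only [List.filterMap_cons, hsome, List.filterMap_nil]
    rw [show a + 1 - (c + 1) = a - c by omega]
    rw [List.drop_eq_getElem_cons hac, List.take_succ_cons, List.reverse_cons]
    rw [show a - c + 1 = a + 1 - c by omega]

theorem sliceNegOne {α : Type} (xs : List α) (a b : ℕ) (hb : b < a) (ha : a < xs.length) :
    PySem.List.slice? xs (some (a : Int)) (some (b : Int)) (-1)
      = some (((xs.drop (b + 1)).take (a - b)).reverse) := by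
  have hsi : PySem.List.sliceIndices xs.length (some (a : Int)) (some (b : Int)) (-1)
      = ((a : Int), (b : Int), -1) := by
    unfold PySem.List.sliceIndices
    have h1 : ¬ ((a : Int) < 0) := by omega
    have h2 : ¬ ((b : Int) < 0) := by omega
    have h3 : ((-1 : Int) < 0) := by norm_num
    simp only [if_pos h3, if_neg h1, if_neg h2, Prod.mk.injEq]
    exact ⟨by omega, by omega, trivial⟩
  unfold PySem.List.slice?
  rw [if_neg (by norm_num : ¬ ((-1 : Int) = 0))]
  rw [hsi]
  have hcount : (if 0 < (-1 : Int) then if (a : Int) < (b : Int) then (((b : Int) - a + -1 - 1) / -1).toNat else 0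
      else if (b : Int) < (a : Int) then (((a : Int) - b + -(-1) - 1) / -(-1)).toNat else 0) = a - b := by
    rw [if_neg (by norm_num), if_pos (by omega : (b : Int) < (a : Int))]
    have hdiv : ((a : Int) - b + - -1 - 1) / - -1 = (a : Int) - b := by norm_num
    rw [hdiv]
    omega
  simp only [hcount]
  rw [filterMap_range_rev xs a ha (a - b) (by omega)]
  rw [show a + 1 - (a - b) = b + 1 by omega]

-- small list helpers
theorem drop_len_add (l₁ l₂ : List Char) (n : ℕ) : (l₁ ++ l₂).drop (l₁.length + n) = l₂.drop n := by
  induction l₁ with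
  | nil => simp
  | cons a t ih =>
    rw [List.length_cons, show t.length + 1 + n = t.length + n + 1 by omega,
      List.cons_append, List.drop_succ_cons]
    exact ih

theorem flatMap_map' {α β γ : Type} (l : List α) (f : α → β) (g : β → List γ) :
    (l.map f).flatMap g = l.flatMap (fun x => g (f x)) := by
  induction l with
  | nil => rfl
  | cons a t ih => simp only [List.map_cons, List.flatMap_cons, ih]

theorem flatMap_congr_mem {α β : Type} (l : List α) (f g : α → List β)
    (h : ∀ x ∈ l, f x = g x) : l.flatMap f = l.flatMap g := by
  induction l with
  | nil => rfl
  | cons a t ih =>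
    simp only [List.flatMap_cons, h a (by simp), ih (fun x hx => h x (by simp [hx]))]

-- joinNL structure
theorem join_cons_flat : ∀ (r : List Char) (rs : List (List Char)),
    joinNL (r :: rs) = r ++ rs.flatMap (fun x => '\n' :: x)
  | r, [] => by simp [joinNL, PySem.Chars.join, List.intercalate, List.intersperse]
  | r, s :: t => by
    have ih := join_cons_flat s t
    simp only [joinNL, PySem.Chars.join, List.intercalate, List.intersperse] at ih ⊢
    simp_all

theorem join_cons₂ (r s : List Char) (t : List (List Char)) :
    joinNL (r :: s :: t) = r ++ '\n' :: joinNL (s :: t) := by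
  simp [join_cons_flat]

theorem join_append (rs ss : List (List Char)) (h1 : rs ≠ []) (h2 : ss ≠ []) :
    joinNL (rs ++ ss) = joinNL rs ++ '\n' :: joinNL ss := by
  obtain ⟨r, rs', rfl⟩ : ∃ r rs', rs = r :: rs' := by
    cases rs with | nil => exact absurd rfl h1 | cons r rs' => exact ⟨r, rs', rfl⟩
  obtain ⟨s, ss', rfl⟩ : ∃ s ss', ss = s :: ss' := by
    cases ss with | nil => exact absurd rfl h2 | cons s ss' => exact ⟨s, ss', rfl⟩
  simp [join_cons_flat, List.flatMap_append]

theorem join_reverse : ∀ rs : List (List Char),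
    (joinNL rs).reverse = joinNL ((rs.map List.reverse).reverse)
  | [] => by simp [joinNL, PySem.Chars.join, List.intercalate, List.intersperse]
  | [r] => by simp [joinNL, PySem.Chars.join, List.intercalate, List.intersperse]
  | r :: s :: t => by
    have ih := join_reverse (s :: t)
    have h1 : ((s :: t).map List.reverse).reverse ≠ [] := by simp
    rw [join_cons₂, List.map_cons, List.reverse_cons,
      join_append _ [r.reverse] h1 (by simp), ← ih]
    simp [joinNL, PySem.Chars.join, List.intercalate, List.intersperse]

theorem join_length_const : ∀ (rs : List (List Char)) (w : ℕ), rs ≠ [] →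
    (∀ r ∈ rs, r.length = w) → (joinNL rs).length = rs.length * w + (rs.length - 1)
  | [r], w, _, hw => by simp [joinNL, PySem.Chars.join, List.intercalate, List.intersperse, hw r]
  | r :: s :: t, w, _, hw => by
    have ih := join_length_const (s :: t) w (by simp) (fun x hx => hw x (List.mem_cons_of_mem r hx))
    rw [join_cons₂]
    simp only [List.length_append, List.length_cons, ih, hw r (by simp)]
    simp [Nat.succ_mul]
    try omega

theorem join_drop (r : List Char) (rs : List (List Char)) :
    (joinNL (r :: rs)).drop (r.length + 1) = joinNL rs := by
  rw [join_cons_flat, drop_len_add]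
  cases rs with
  | nil => simp [joinNL, PySem.Chars.join, List.intercalate, List.intersperse]
  | cons s t => rw [join_cons_flat]; simp

-- row facts
theorem rowC_eq_pal (cs : List Char) (i : ℕ) (hi : i < cs.length) :
    (cs.drop i).reverse ++ cs.drop (i + 1)
      = (cs.drop (i + 1)).reverse ++ cs[i] :: cs.drop (i + 1) := by
  conv_lhs => rw [List.drop_eq_getElem_cons hi]
  rw [List.reverse_cons, List.append_assoc, List.singleton_append]

theorem rowC_reverse (cs : List Char) (i : ℕ) (hi : i < cs.length) :
    (rowC cs i).reverse = rowC cs i := by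
  unfold rowC
  rw [ispD_reverse]
  congr 1
  rw [rowC_eq_pal cs i hi]
  rw [List.reverse_append, List.reverse_cons, List.reverse_reverse]
  simp [List.append_assoc]

theorem rowC_length (cs : List Char) (i : ℕ) (hi : i < cs.length) :
    (rowC cs i).length = 4 * (cs.length - i) - 3 := by
  unfold rowC
  rw [ispD_length _ (by simp; omega)]
  simp
  omega

theorem rowP_eq_pad (cs : List Char) (i : ℕ) (hi : i < cs.length) :
    rowP cs i = List.replicate (2 * i) '.' ++ rowC cs i ++ List.replicate (2 * i) '.' := by
  unfold rowP
  have hw : rowW cs = ((4 * cs.length - 3 : ℕ) : Int) := by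
    unfold rowW; omega
  rw [hw, pyCenter_pad (rowC cs i) (4 * cs.length - 3) '.' (2 * i)
    (by rw [rowC_length cs i hi]; omega)]

theorem rowP_length (cs : List Char) (i : ℕ) (hi : i < cs.length) :
    (rowP cs i).length = 4 * cs.length - 3 := by
  rw [rowP_eq_pad cs i hi]
  simp [rowC_length cs i hi]
  omega

theorem rowP_reverse (cs : List Char) (i : ℕ) (hi : i < cs.length) :
    (rowP cs i).reverse = rowP cs i := by
  rw [rowP_eq_pad cs i hi]
  simp [rowC_reverse cs i hi, List.append_assoc]

-- index identity: |r-(L-1)| over r = 0..2L-2 enumerates L-1..1 then 0..L-1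
theorem idx_list (L : ℕ) (hL : 1 ≤ L) :
    (List.range (2 * L - 1)).map (fun j => if j ≤ L - 1 then L - 1 - j else j - (L - 1))
      = ((List.range (L - 1)).map (fun k => k + 1)).reverse
        ++ 0 :: (List.range (L - 1)).map (fun k => k + 1) := by
  apply List.ext_getElem (by simp; omega)
  intro i h1 h2
  simp [List.getElem_append, List.getElem_reverse, List.getElem_cons]
  split_ifs <;> omega

-- B's row equals rowP
theorem rowB_eq (cs : List Char) (n : ℕ) (r : Int)
    (hr : |r - ((cs.length : Int) - 1)| = (n : Int)) :
    rowB cs (cs.length : Int) (((cs.length : Int) * 2 - 1) * 2 - 1) r = rowP cs n := by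
  have e1 : PySem.List.slice cs (some ((n : ℕ) : Int)) none = cs.drop n :=
    PySem.List.slice_from_natCast cs n
  have e2 : PySem.List.slice cs (some (((n : ℕ) : Int) + 1)) none = cs.drop (n + 1) := by
    rw [show ((n : ℕ) : Int) + 1 = ((n + 1 : ℕ) : Int) by omega]
    exact PySem.List.slice_from_natCast cs (n + 1)
  simp only [rowB, hr, e1, e2, PySem.List.slice?_none_none_neg_one, Option.getD_some]
  rw [joinSing]
  rfl

-- B unfolded to rowP form
theorem genB_eq (chars : String) (hL : 1 ≤ chars.toList.length) :
    gen_pattern_alt chars = String.ofList (joinNL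
      (((List.range (2 * chars.toList.length - 1)).map
          (fun j => if j ≤ chars.toList.length - 1 then chars.toList.length - 1 - j
                    else j - (chars.toList.length - 1))).map (rowP chars.toList))) := by
  have key : (PySem.List.pyRange 0 (2 * (chars.toList.length : Int) - 1) 1).foldl
      (fun rows r => rows ++ [rowB chars.toList (chars.toList.length : Int)
        (((chars.toList.length : Int) * 2 - 1) * 2 - 1) r]) []
      = ((List.range (2 * chars.toList.length - 1)).map
          (fun j => if j ≤ chars.toList.length - 1 then chars.toList.length - 1 - j
                    else j - (chars.toList.length - 1))).map (rowP chars.toList) := by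
    rw [PySem.List.foldl_append_singleton_eq_map, List.nil_append, PySem.List.pyRange_one,
      show ((2 * (chars.toList.length : Int) - 1) - 0).toNat = 2 * chars.toList.length - 1 by omega,
      List.map_map, List.map_map]
    apply List.map_congr_left
    intro j hj
    simp only [List.mem_range] at hj
    simp only [Function.comp_apply]
    apply rowB_eq
    split_ifs with h
    · rw [abs_of_nonpos (by omega)]; omega
    · rw [abs_of_nonneg (by omega)]; omega
  show String.ofList (PySem.Chars.join ['\n']
      ((PySem.List.pyRange 0 (2 * PySem.Chars.len chars.toList - 1) 1).foldl
        (fun rows r => rows ++ [rowB chars.toList (PySem.Chars.len chars.toList)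
          ((PySem.Chars.len chars.toList * 2 - 1) * 2 - 1) r]) [])) = _
  rw [PySem.Chars.len_eq, key]
  rfl

-- A's loop line equals rowP (k+1)
theorem lineA_eq (cs : List Char) (k : ℕ) (hk : k < cs.length - 1) :
    lineA cs (cs.length : Int) (((cs.length : Int) * 2 - 1) * 2 - 1) ((1 : Int) + (k : ℕ))
      = rowP cs (k + 1) := by
  have e1 : (PySem.List.slice? cs (some ((cs.length : Int) - 1)) (some ((1 : Int) + (k : ℕ) - 1)) (-1)).getD []
      = (cs.drop (k + 1)).reverse := by
    rw [show (1 : Int) + (k : ℕ) - 1 = ((k : ℕ) : Int) by omega,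
      show (cs.length : Int) - 1 = ((cs.length - 1 : ℕ) : Int) by omega,
      sliceNegOne cs (cs.length - 1) k (by omega) (by omega),
      List.take_of_length_le (by simp; try omega)]
    rfl
  have e2 : PySem.List.slice cs (some ((1 : Int) + (k : ℕ) + 1)) (some (cs.length : Int))
      = cs.drop (k + 2) := by
    rw [show (1 : Int) + (k : ℕ) + 1 = ((k + 2 : ℕ) : Int) by push_cast; ring]
    rw [PySem.List.slice_natCast]
    exact List.take_of_length_le (by simp)
  simp only [lineA, e1, e2]
  rw [joinSing]
  rfl

-- A unfolded to rowP form (length ≥ 2)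
theorem genA_eq (chars : String) (hL2 : 2 ≤ chars.toList.length) :
    gen_pattern chars = String.ofList
      (joinNL ((restRows chars.toList).reverse
        ++ rowP chars.toList 0 :: restRows chars.toList)) := by
  have hne1 : ¬ ((chars.toList.length : Int) = 1) := by omega
  have h2 : ((chars.toList.length - 1 : ℕ) : Int) = (chars.toList.length : Int) - 1 := by
    omega
  simp only [gen_pattern, PySem.Chars.len_eq, if_neg hne1]
  -- first row
  have hlow := sliceNegOne chars.toList (chars.toList.length - 1) 0 (by omega) (by omega)
  simp only [Nat.cast_zero, h2] at hlow
  rw [hlow, List.take_of_length_le (by simp; try omega)]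
  simp only [Option.getD_some]
  have hfirst : (chars.toList.drop (0 + 1)).reverse ++ chars.toList
      = (chars.toList.drop 0).reverse ++ chars.toList.drop (0 + 1) := by
    obtain ⟨c, t, hct⟩ : ∃ c t, chars.toList = c :: t := by
      cases h : chars.toList with
      | nil => rw [h] at hL2; simp at hL2
      | cons c t => exact ⟨c, t, rfl⟩
    rw [hct]; simp
  rw [hfirst, joinSing]
  have hrow0 : pyCenter (ispD ((chars.toList.drop 0).reverse ++ chars.toList.drop (0 + 1)))
      (((chars.toList.length : Int) * 2 - 1) * 2 - 1) '.' = rowP chars.toList 0 := rfl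
  rw [hrow0]
  -- the loop
  rw [PySem.List.foldl_append_eq_flatMap
    (fun index => '\n' :: lineA chars.toList (chars.toList.length : Int)
      (((chars.toList.length : Int) * 2 - 1) * 2 - 1) index)]
  rw [PySem.List.pyRange_one,
    show ((chars.toList.length : Int) - 1).toNat = chars.toList.length - 1 by omega,
    flatMap_map']
  have hflat : (List.range (chars.toList.length - 1)).flatMap
      (fun x => '\n' :: lineA chars.toList (chars.toList.length : Int)
        (((chars.toList.length : Int) * 2 - 1) * 2 - 1) ((1 : Int) + (x : ℕ)))
      = (List.range (chars.toList.length - 1)).flatMap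
        (fun k => '\n' :: rowP chars.toList (k + 1)) := by
    apply flatMap_congr_mem
    intro k hk
    simp only [List.mem_range] at hk
    rw [lineA_eq chars.toList k (by omega)]
  rw [hflat]
  -- string as joinNL
  have hS : rowP chars.toList 0 ++ (List.range (chars.toList.length - 1)).flatMap
        (fun k => '\n' :: rowP chars.toList (k + 1))
      = joinNL (rowP chars.toList 0 :: restRows chars.toList) := by
    rw [join_cons_flat]
    congr 1
    unfold restRows
    rw [flatMap_map']
  rw [hS]
  -- abstract the products for linear arithmetic
  obtain ⟨W, hWdef⟩ : ∃ W, 4 * chars.toList.length - 3 = W := ⟨_, rfl⟩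
  obtain ⟨P, hPdef⟩ : ∃ P, chars.toList.length * W = P := ⟨_, rfl⟩
  obtain ⟨Q, hQdef⟩ : ∃ Q, (chars.toList.length - 1) * W = Q := ⟨_, rfl⟩
  have hW5 : 5 ≤ W := by omega
  have hPge : 2 * W ≤ P := by rw [← hPdef]; exact Nat.mul_le_mul_right _ hL2
  have hQP : Q + W = P := by
    rw [← hPdef, ← hQdef]
    conv_rhs => rw [show chars.toList.length = (chars.toList.length - 1) + 1 by omega]
    rw [Nat.succ_mul]
  have hrowslen : ∀ r ∈ rowP chars.toList 0 :: restRows chars.toList, r.length = W := by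
    intro r hr
    rcases List.mem_cons.mp hr with rfl | hr
    · rw [rowP_length chars.toList 0 (by omega)]; omega
    · unfold restRows at hr
      obtain ⟨k, hk, rfl⟩ := List.mem_map.mp hr
      simp only [List.mem_range] at hk
      rw [rowP_length chars.toList (k + 1) (by omega)]; omega
  have hrestcnt : (restRows chars.toList).length = chars.toList.length - 1 := by
    unfold restRows; simp
  have hcnt : (rowP chars.toList 0 :: restRows chars.toList).length = chars.toList.length := by
    rw [List.length_cons, hrestcnt]
    omega
  have hjl : (joinNL (rowP chars.toList 0 :: restRows chars.toList)).length
      = P + (chars.toList.length - 1) := by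
    rw [join_length_const _ W (by simp) hrowslen, hcnt, hPdef]
  have hlen1 : ((joinNL (rowP chars.toList 0 :: restRows chars.toList)).length : Int) - 1
      = ((P + (chars.toList.length - 1) - 1 : ℕ) : Int) := by
    rw [hjl]
    omega
  have hdots : ((chars.toList.length : Int) * 2 - 1) * 2 - 1 = ((W : ℕ) : Int) := by omega
  have hmir := sliceNegOne (joinNL (rowP chars.toList 0 :: restRows chars.toList))
    (P + (chars.toList.length - 1) - 1) W (by omega) (by rw [hjl]; omega)
  rw [hlen1, hdots, hmir]
  simp only [Option.getD_some]
  have hdrop : (joinNL (rowP chars.toList 0 :: restRows chars.toList)).drop (W + 1)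
      = joinNL (restRows chars.toList) := by
    rw [show W + 1 = (rowP chars.toList 0).length + 1 by
      rw [rowP_length chars.toList 0 (by omega)]; omega]
    exact join_drop _ _
  have hrestne : restRows chars.toList ≠ [] := by
    intro hnil
    have h0 := hrestcnt
    rw [hnil, List.length_nil] at h0
    omega
  have hrestlen : (joinNL (restRows chars.toList)).length = Q + (chars.toList.length - 2) := by
    rw [join_length_const _ W hrestne (by
      intro r hr
      unfold restRows at hr
      obtain ⟨k, hk, rfl⟩ := List.mem_map.mp hr
      simp only [List.mem_range] at hk
      rw [rowP_length chars.toList (k + 1) (by omega)]; omega), hrestcnt, hQdef]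
    omega
  have htake : (joinNL (restRows chars.toList)).take (P + (chars.toList.length - 1) - 1 - W)
      = joinNL (restRows chars.toList) :=
    List.take_of_length_le (by rw [hrestlen]; omega)
  have hpal : (restRows chars.toList).map List.reverse = restRows chars.toList := by
    unfold restRows
    rw [List.map_map]
    apply List.map_congr_left
    intro k hk
    simp only [List.mem_range] at hk
    simp only [Function.comp_apply]
    exact rowP_reverse chars.toList (k + 1) (by omega)
  rw [hdrop, htake, join_reverse, hpal]
  rw [← join_append ((restRows chars.toList).reverse) (rowP chars.toList 0 :: restRows chars.toList)
    (by simpa using hrestne) (by simp)]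

-- ===== VERDICT (by name: the statement is the Claim_ definition above) =====
theorem gen_pattern_spec : Claim_unchanged_gen_pattern := by
  intro chars _ hD
  have hol : String.ofList chars.toList = chars := String.ofList_toList
  have hne : chars.toList ≠ [] := by
    intro h
    apply hD
    unfold D_gen_pattern
    rw [← hol, h]
  have hL : 1 ≤ chars.toList.length := by
    cases h : chars.toList with
    | nil => exact absurd h hne
    | cons a t => simp
  by_cases h1 : chars.toList.length = 1
  · -- length 1: A returns chars; B builds the single row, which is chars itself
    obtain ⟨c, hc⟩ : ∃ c, chars.toList = [c] := by
      cases h : chars.toList with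
      | nil => exact absurd h hne
      | cons a t =>
        cases t with
        | nil => exact ⟨a, rfl⟩
        | cons b t' => rw [h] at h1; simp at h1
    have hA : gen_pattern chars = chars := by
      simp [gen_pattern, PySem.Chars.len_eq, hc]
    have h0 : rowP [c] 0 = [c] := by
      have hcont : rowC [c] 0 = [c] := by simp [rowC, ispD]
      have hw : rowW [c] = 1 := by simp [rowW]
      unfold rowP
      rw [hcont, hw]
      exact pyCenter_of_le [c] 1 '.' (by simp)
    have hB : gen_pattern_alt chars = chars := by
      rw [genB_eq chars hL, hc]
      have hlist : (List.range (2 * ([c] : List Char).length - 1)).map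
            (fun j => if j ≤ ([c] : List Char).length - 1 then ([c] : List Char).length - 1 - j
              else j - (([c] : List Char).length - 1)) = [0] := by
        norm_num [List.range_one]
      rw [hlist, show ([0] : List ℕ).map (rowP [c]) = [[c]] by simp [h0]]
      rw [show joinNL [[c]] = [c] by simp [joinNL, PySem.Chars.join, List.intercalate, List.intersperse]]
      rw [← hc, hol]
    rw [hA, hB]
  · have hL2 : 2 ≤ chars.toList.length := by omega
    rw [genA_eq chars hL2, genB_eq chars hL]
    rw [idx_list chars.toList.length hL, List.map_append, List.map_cons, List.map_reverse,
      List.map_map]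
    unfold restRows
    rw [show (rowP chars.toList ∘ fun k => k + 1) = (fun k => rowP chars.toList (k + 1)) from rfl]

theorem gen_pattern_changed : Claim_changed_gen_pattern := by unfold Claim_changed_gen_pattern; decide

theorem gen_pattern_tight : Claim_exact_gen_pattern := by
  intro chars _ hD
  unfold D_gen_pattern at hD
  subst hD
  decide
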